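-- pv_equiv track=rewrite | github.com/Gyu-Seok0/Coding-Test | kakao/0506_2020_Blind_Prob6_weak.py | solution
-- ===== SOURCE A (Python) =====
-- from collections import deque
--
-- def solution(n, weak, dist):
--     dist.sort(reverse = True)
--     q = deque([weak])
--     visited = set()
--     visited.add(tuple(weak))
--     for i in range(len(dist)): # 거리
--         d = dist[i]
--         for _ in range(len(q)): # weak
--             current = q.popleft()
--             for p in current: # weak point
--                 l = p
--                 r = (p+d) % n
--                 if l < r:
--                     temp = tuple(filter(lambda x: x < l or x > r, current))
--                 else:
--                     temp = tuple(filter(lambda x: r < x < l, current))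
--                 if len(temp) == 0:
--                     return (i+1)
--                 elif temp not in visited: # 이전에 방문한적이 있다면, 이미 q에 들어가 있을 것이므로 굳이 또 넣을 필요가 없다.
--                     visited.add(temp)
--                     q.append(list(temp))
--     return -1
-- ===== SOURCE B (Python) =====
-- def solution(n, weak, dist):
--     # Label-setting DP over reachable states instead of a level-synchronous BFS:
--     # each state (a subsequence of weak) gets its earliest production level; since a
--     # friend always removes his start point, parents are strictly longer than their
--     # children, so sweeping state sizes in decreasing order finalizes every level
--     # before the state is expanded (with the distance selected by that level), and
--     # the answer is a global min over full-cover events instead of an early return.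
--     dist.sort(reverse=True)
--     k = len(dist)
--     m = len(weak)
--     start = tuple(weak)
--     lvl = {start: 0}
--     buckets = [[] for _ in range(m + 1)]
--     buckets[m].append(start)
--     best = None
--     for length in range(m, 0, -1):
--         for t in buckets[length]:
--             j = lvl[t]
--             if j >= k:
--                 continue
--             if best is not None and best <= j + 1:
--                 continue
--             d = dist[j]
--             for p in t:
--                 r = (p + d) % n
--                 if p < r:
--                     child = tuple(x for x in t if x < p or x > r)
--                 else:
--                     child = tuple(x for x in t if r < x < p)
--                 if not child:
--                     if best is None or j + 1 < best:
--                         best = j + 1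
--                 elif child not in lvl:
--                     lvl[child] = j + 1
--                     buckets[len(child)].append(child)
--                 elif j + 1 < lvl[child]:
--                     lvl[child] = j + 1
--     return -1 if best is None else best
-- ===== Notes on version B (the rewrite author's own statement) =====
-- stated objective: alternative
-- what changed: B replaces A's level-synchronous BFS (FIFO queue, visited set, one pass per sorted distance, early return at the first full cover) with a label-setting dynamic program: every reachable state is given its earliest-production level in a dict, states are bucketed by size and sizes swept in decreasing order (a friend always removes his start point, so parents are strictly longer and each level is final before its state is expanded with the distance that level selects), a state is skipped once the running best bound can no longer be beaten, and the result is a global minimum over full-cover events …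
import Mathlib
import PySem

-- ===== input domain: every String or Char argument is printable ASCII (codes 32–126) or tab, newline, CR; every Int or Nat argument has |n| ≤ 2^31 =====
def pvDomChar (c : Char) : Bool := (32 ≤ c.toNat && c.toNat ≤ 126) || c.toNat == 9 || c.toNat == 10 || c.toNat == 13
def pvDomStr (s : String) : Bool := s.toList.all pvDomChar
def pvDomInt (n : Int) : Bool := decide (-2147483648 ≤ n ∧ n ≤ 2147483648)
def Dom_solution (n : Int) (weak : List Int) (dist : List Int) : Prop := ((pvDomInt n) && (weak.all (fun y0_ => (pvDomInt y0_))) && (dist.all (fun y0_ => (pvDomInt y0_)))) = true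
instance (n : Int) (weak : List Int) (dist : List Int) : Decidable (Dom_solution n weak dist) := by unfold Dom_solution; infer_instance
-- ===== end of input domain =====

-- B replaces A's level-synchronous BFS (queue + visited set + early return) by a label-setting
-- DP: states bucketed by size, sizes swept in decreasing order, each state expanded once at its
-- final earliest-production level, answer = global min over full-cover events (objective:
-- alternative). Both Pythons sort `dist` in place (same side effect); equivalence is about the
-- return value.

-- ===== PORT A =====
-- temp = tuple(filter(...)) for one start point p (l = p, r = (p+d) % n)
def keepA (n d : Int) (cur : List Int) (p : Int) : List Int :=
  let l := p
  let r := PySem.Int.mod (p + d) n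
  if l < r then cur.filter (fun x => decide (x < l) || decide (r < x))
  else cur.filter (fun x => decide (r < x) && decide (x < l))

-- inner `for p in current` loop; none = the `return (i+1)` was hit
def expandA (n d : Int) (cur : List Int) : List Int → List (List Int) → PySem.Set (List Int) →
    Option (List (List Int) × PySem.Set (List Int))
  | [], q, vis => some (q, vis)
  | p :: ps, q, vis =>
    let temp := keepA n d cur p
    if temp.length = 0 then none
    else if PySem.Set.contains vis temp then expandA n d cur ps q vis
    else expandA n d cur ps (q ++ [temp]) (PySem.Set.add vis temp)

-- middle `for _ in range(len(q)): current = q.popleft()` loop: the states present at the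
-- start of the level are processed; states appended during the level form the next queue
def levelA (n d : Int) : List (List Int) → List (List Int) → PySem.Set (List Int) →
    Option (List (List Int) × PySem.Set (List Int))
  | [], news, vis => some (news, vis)
  | cur :: olds, news, vis =>
    match expandA n d cur cur news vis with
    | none => none
    | some (news', vis') => levelA n d olds news' vis'

-- outer `for i in range(len(dist))` loop
def bfsA (n : Int) : List Int → Int → List (List Int) → PySem.Set (List Int) → Int
  | [], _, _, _ => -1
  | d :: ds, i, q, vis =>
    match levelA n d q [] vis with
    | none => i + 1
    | some (q', vis') => bfsA n ds (i + 1) q' vis'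

def solution (n : Int) (weak : List Int) (dist : List Int) : Int :=
  bfsA n (PySem.List.sorted dist (fun x => x) true) 0 [weak]
    (PySem.Set.add PySem.Set.empty weak)

-- ===== PORT B =====
-- child = tuple(x for x in t if ...): the points the friend starting at p does NOT cover
def keepB (n d : Int) (t : List Int) (p : Int) : List Int :=
  let r := PySem.Int.mod (p + d) n
  if p < r then t.filter (fun x => decide (x < p) || decide (r < x))
  else t.filter (fun x => decide (r < x) && decide (x < p))

-- running state: (lvl dict, buckets list indexed by state size, best)
def StB : Type := PySem.Dict (List Int) Int × List (List (List Int)) × Option Int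

-- inner `for p in t` loop of Source B
def stepB (n d : Int) (j : Int) (t : List Int) : List Int → StB → StB
  | [], st => st
  | p :: ps, (lv, bks, best) =>
    let child := keepB n d t p
    if child.length = 0 then
      let best' : Option Int :=
        match best with
        | none => some (j + 1)
        | some b => if j + 1 < b then some (j + 1) else some b
      stepB n d j t ps (lv, bks, best')
    else
      match PySem.Dict.get? lv child with
      | none =>
        stepB n d j t ps
          (PySem.Dict.insert lv child (j + 1),
           bks.modify child.length (fun b => b ++ [child]), best)
      | some c =>
        if j + 1 < c then stepB n d j t ps (PySem.Dict.insert lv child (j + 1), bks, best)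
        else stepB n d j t ps (lv, bks, best)

-- `for t in buckets[length]` loop with the branch-and-bound skip (every bucket entry has a
-- lvl entry; the `none`
-- branch is unreachable, as is the `.getD 0` on `dist[j]` for the in-range j)
def bucketB (n : Int) (ds : List Int) (k : Int) : List (List Int) → StB → StB
  | [], st => st
  | t :: ts, st =>
    match PySem.Dict.get? st.1 t with
    | none => bucketB n ds k ts st
    | some j =>
      if k ≤ j then bucketB n ds k ts st
      else
        match st.2.2 with
        | some b =>
          if b ≤ j + 1 then bucketB n ds k ts st
          else bucketB n ds k ts (stepB n ((PySem.List.pyGet? ds j).getD 0) j t t st)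
        | none => bucketB n ds k ts (stepB n ((PySem.List.pyGet? ds j).getD 0) j t t st)

-- `for length in range(m, 0, -1)` loop
def stageB (n : Int) (ds : List Int) (k : Int) : Nat → StB → StB
  | 0, st => st
  | l + 1, st => stageB n ds k l (bucketB n ds k (st.2.1.getD (l + 1) []) st)

def solution_alt (n : Int) (weak : List Int) (dist : List Int) : Int :=
  let ds := PySem.List.sorted dist (fun x => x) true
  let k : Int := ds.length
  let m := weak.length
  let st0 : StB :=
    (PySem.Dict.insert PySem.Dict.empty weak 0,
     (List.replicate (m + 1) ([] : List (List Int))).set m [weak], none)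
  match (stageB n ds k m st0).2.2 with
  | none => -1
  | some b => b

-- ===== PRECONDITION & SPEC =====
-- Pre_ excludes exactly the inputs on which A raises ZeroDivisionError at `(p+d) % n`:
-- n = 0 with both a weak point and a distance present; on every other input A returns.
def Pre_solution (n : Int) (weak : List Int) (dist : List Int) : Prop :=
  ¬ (n = 0 ∧ weak ≠ [] ∧ dist ≠ [])
instance (n : Int) (weak : List Int) (dist : List Int) : Decidable (Pre_solution n weak dist) := by
  unfold Pre_solution; infer_instance
def pvWitness_solution : Int × List Int × List Int := (7, [1, 3, 5], [2, 1])

def Spec_solution (n : Int) (weak : List Int) (dist : List Int) (out : Int) : Prop := out = solution_alt n weak dist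
instance (n : Int) (weak : List Int) (dist : List Int) (out : Int) : Decidable (Spec_solution n weak dist out) := by unfold Spec_solution; infer_instance

-- ===== CLAIM (what is proved, stated in full; the proofs are below) =====
def Claim_equal_solution : Prop := ∀ (n : Int) (weak : List Int) (dist : List Int), Dom_solution n weak dist → Pre_solution n weak dist → Spec_solution n weak dist (solution n weak dist)

-- ===== LEMMAS AND PROOFS =====

-- distance used at level i
def dAt (ds : List Int) (i : Nat) : Int := ds.getD i 0

-- (frontier, visited) of A's pruned BFS after i levels, as predicates
def FrV (n : Int) (weak : List Int) (ds : List Int) : Nat → (List Int → Prop) × (List Int → Prop)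
  | 0 => (fun S => S = weak, fun S => S = weak)
  | i + 1 =>
    (fun S => ¬ (FrV n weak ds i).2 S ∧ S ≠ [] ∧
        ∃ T p, (FrV n weak ds i).1 T ∧ p ∈ T ∧ keepA n (dAt ds i) T p = S,
     fun S => (FrV n weak ds i).2 S ∨
       (¬ (FrV n weak ds i).2 S ∧ S ≠ [] ∧
        ∃ T p, (FrV n weak ds i).1 T ∧ p ∈ T ∧ keepA n (dAt ds i) T p = S))

def Fr (n : Int) (weak ds : List Int) (i : Nat) (S : List Int) : Prop := (FrV n weak ds i).1 S
def Vi (n : Int) (weak ds : List Int) (i : Nat) (S : List Int) : Prop := (FrV n weak ds i).2 S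

-- an empty production happens while processing level i
def Hit (n : Int) (weak ds : List Int) (i : Nat) : Prop :=
  ∃ S p, Fr n weak ds i S ∧ p ∈ S ∧ keepA n (dAt ds i) S p = []

-- a level-i production event from a parent satisfying P
def ProdFrom (n : Int) (weak ds : List Int) (P : List Int → Prop) (i : Nat) (S : List Int) : Prop :=
  i < ds.length ∧ ∃ T p, P T ∧ Fr n weak ds i T ∧ p ∈ T ∧ keepA n (dAt ds i) T p = S

-- events added by processing the points qs of state t at level i
def EvPlus (E : Nat → List Int → Prop) (n d : Int) (i : Nat) (t : List Int) (qs : List Int) :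
    Nat → List Int → Prop :=
  fun i' S => E i' S ∨ (i' = i ∧ ∃ p ∈ qs, keepA n d t p = S)

-- B's dict invariant: an entry is the min over recorded production events (weak is seeded 0)
def LvInv (weak : List Int) (E : Nat → List Int → Prop) (lv : PySem.Dict (List Int) Int) : Prop :=
  ∀ S v, lv.get? S = some v ↔
    ((S = weak ∧ v = 0) ∨
     (S ≠ weak ∧ S ≠ [] ∧ (∃ i, E i S ∧ v = (i : Int) + 1) ∧ ∀ i, E i S → v ≤ (i : Int) + 1))

-- B's buckets invariant: bucket ℓ holds exactly the dict keys of length ℓ, without duplicates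
def BksInv (lv : PySem.Dict (List Int) Int) (bks : List (List (List Int))) (m : Nat) : Prop :=
  bks.length = m + 1 ∧
  ∀ l, (bks.getD l []).Nodup ∧
    ∀ S, S ∈ bks.getD l [] ↔ (S.length = l ∧ ∃ v, lv.get? S = some v)

-- B's best invariant: min over recorded full-cover events
def BestInv (E : Nat → List Int → Prop) (best : Option Int) : Prop :=
  (best = none ∧ ∀ i, ¬ E i []) ∨
  (∃ b, best = some b ∧ (∃ i, E i [] ∧ b = (i : Int) + 1) ∧ ∀ i, E i [] → b ≤ (i : Int) + 1)

theorem keepB_eq_keepA (n d : Int) (t : List Int) (p : Int) : keepB n d t p = keepA n d t p := rfl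

theorem keep_sublist (n d : Int) (cur : List Int) (p : Int) : (keepA n d cur p).Sublist cur := by
  by_cases h : p < PySem.Int.mod (p + d) n <;> simp [keepA, h, List.filter_sublist]

theorem keep_length_lt (n d : Int) (cur : List Int) (p : Int) (hp : p ∈ cur) :
    (keepA n d cur p).length < cur.length := by
  by_cases h : p < PySem.Int.mod (p + d) n
  · simp only [keepA, h, if_true]
    refine List.length_filter_lt_length_iff_exists.mpr ⟨p, hp, ?_⟩
    simp only [Bool.or_eq_true, decide_eq_true_eq, not_or, not_lt]
    omega
  · simp only [keepA, h, if_false]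
    refine List.length_filter_lt_length_iff_exists.mpr ⟨p, hp, ?_⟩
    simp only [Bool.and_eq_true, decide_eq_true_eq, not_and, not_lt]
    omega

theorem Fr_sublist (n : Int) (weak ds : List Int) : ∀ (i : Nat) (S : List Int),
    Fr n weak ds i S → S.Sublist weak := by
  intro i
  induction i with
  | zero => intro S h; rw [show S = weak from h]
  | succ i ih =>
    rintro S ⟨-, -, T, p, hT, hp, hk⟩
    exact (hk ▸ keep_sublist n (dAt ds i) T p).trans (ih T hT)

theorem Fr_subset_Vi (n : Int) (weak ds : List Int) : ∀ (i : Nat) (S : List Int),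
    Fr n weak ds i S → Vi n weak ds i S := by
  intro i
  cases i with
  | zero => intro S h; exact h
  | succ i => intro S h; exact Or.inr h

theorem Vi_succ (n : Int) (weak ds : List Int) (i : Nat) (S : List Int) :
    Vi n weak ds (i + 1) S ↔ Vi n weak ds i S ∨ Fr n weak ds (i + 1) S := Iff.rfl

theorem Vi_mono (n : Int) (weak ds : List Int) (i j : Nat) (hij : i ≤ j) (S : List Int)
    (h : Vi n weak ds i S) : Vi n weak ds j S := by
  induction j with
  | zero => exact (Nat.le_zero.mp hij) ▸ h
  | succ j ih =>
    rcases Nat.lt_or_ge i (j + 1) with hlt | hge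
    · exact Or.inl (ih (Nat.lt_succ_iff.mp hlt))
    · exact (Nat.le_antisymm hij hge) ▸ h

theorem Vi_iff (n : Int) (weak ds : List Int) : ∀ (i : Nat) (S : List Int),
    Vi n weak ds i S ↔ ∃ j, j ≤ i ∧ Fr n weak ds j S := by
  intro i
  induction i with
  | zero =>
    intro S
    constructor
    · intro h; exact ⟨0, le_rfl, h⟩
    · rintro ⟨j, hj, h⟩; rw [Nat.le_zero.mp hj] at h; exact h
  | succ i ih =>
    intro S
    constructor
    · rintro (h | h)
      · obtain ⟨j, hj, hF⟩ := (ih S).mp h; exact ⟨j, Nat.le_succ_of_le hj, hF⟩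
      · exact ⟨i + 1, le_rfl, h⟩
    · rintro ⟨j, hj, hF⟩
      rcases Nat.lt_or_ge j (i + 1) with hlt | hge
      · exact Or.inl ((ih S).mpr ⟨j, Nat.lt_succ_iff.mp hlt, hF⟩)
      · exact (Nat.le_antisymm hj hge) ▸ Fr_subset_Vi n weak ds _ S hF

theorem Fr_not_lt (n : Int) (weak ds : List Int) (i j : Nat) (S : List Int)
    (hij : i < j) (hi : Fr n weak ds i S) : ¬ Fr n weak ds j S := by
  obtain ⟨j', rfl⟩ := Nat.exists_eq_add_of_lt hij
  rintro ⟨hnv, -, -⟩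
  exact hnv (Vi_mono n weak ds i (i + j') (Nat.le_add_right i j') S (Fr_subset_Vi n weak ds i S hi))

theorem Fr_unique (n : Int) (weak ds : List Int) (i j : Nat) (S : List Int)
    (hi : Fr n weak ds i S) (hj : Fr n weak ds j S) : i = j := by
  rcases Nat.lt_trichotomy i j with h | h | h
  · exact absurd hj (Fr_not_lt n weak ds i j S h hi)
  · exact h
  · exact absurd hi (Fr_not_lt n weak ds j i S h hj)

theorem set_contains_iff (vis : PySem.Set (List Int)) (S : List Int) :
    PySem.Set.contains vis S = true ↔ S ∈ vis := by
  simp [PySem.Set.contains]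

theorem expandA_spec (n d : Int) (cur : List Int) :
    ∀ (ps : List Int) (q : List (List Int)) (vis : PySem.Set (List Int)),
      q.Nodup → (∀ S ∈ q, S ∈ vis) →
      ((expandA n d cur ps q vis = none ↔ ∃ p ∈ ps, keepA n d cur p = []) ∧
       ∀ q' vis', expandA n d cur ps q vis = some (q', vis') →
         q'.Nodup ∧ (∀ S ∈ q', S ∈ vis') ∧
         (∀ S, S ∈ q' ↔ S ∈ q ∨ (S ≠ [] ∧ S ∉ vis ∧ ∃ p ∈ ps, keepA n d cur p = S)) ∧
         (∀ S, S ∈ vis' ↔ S ∈ vis ∨ (S ≠ [] ∧ ∃ p ∈ ps, keepA n d cur p = S))) := by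
  intro ps
  induction ps with
  | nil =>
    intro q vis hnd hsub
    refine ⟨by simp [expandA], ?_⟩
    rintro q' vis' h
    simp only [expandA, Option.some.injEq, Prod.mk.injEq] at h
    obtain ⟨rfl, rfl⟩ := h
    exact ⟨hnd, hsub, by simp, by simp⟩
  | cons p ps ih =>
    intro q vis hnd hsub
    by_cases hz : (keepA n d cur p).length = 0
    · have hz' : keepA n d cur p = [] := List.length_eq_zero_iff.mp hz
      constructor
      · simp [expandA, hz, hz']
      · rintro q' vis' h
        simp [expandA, hz] at h
    · have hz' : keepA n d cur p ≠ [] := fun h => hz (by simp [h])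
      by_cases hv : keepA n d cur p ∈ vis
      · have hcb : PySem.Set.contains vis (keepA n d cur p) = true := (set_contains_iff _ _).mpr hv
        have hrw : expandA n d cur (p :: ps) q vis = expandA n d cur ps q vis := by
          simp only [expandA, hz, if_false, hcb, if_true]
        obtain ⟨ihnone, ihsome⟩ := ih q vis hnd hsub
        rw [hrw]
        constructor
        · rw [ihnone]
          constructor
          · rintro ⟨x, hx, hk⟩; exact ⟨x, List.mem_cons_of_mem p hx, hk⟩
          · rintro ⟨x, hx, hk⟩
            rcases List.mem_cons.mp hx with rfl | hx'
            · exact absurd hk hz'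
            · exact ⟨x, hx', hk⟩
        · rintro q' vis' h
          obtain ⟨h1, h2, h3, h4⟩ := ihsome q' vis' h
          refine ⟨h1, h2, ?_, ?_⟩
          · intro S
            rw [h3 S]
            constructor
            · rintro (hS | ⟨hne, hnv, x, hx, hk⟩)
              · exact Or.inl hS
              · exact Or.inr ⟨hne, hnv, x, List.mem_cons_of_mem p hx, hk⟩
            · rintro (hS | ⟨hne, hnv, x, hx, hk⟩)
              · exact Or.inl hS
              · rcases List.mem_cons.mp hx with rfl | hx'
                · exact absurd (hk ▸ hv) hnv
                · exact Or.inr ⟨hne, hnv, x, hx', hk⟩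
          · intro S
            rw [h4 S]
            constructor
            · rintro (hS | ⟨hne, x, hx, hk⟩)
              · exact Or.inl hS
              · exact Or.inr ⟨hne, x, List.mem_cons_of_mem p hx, hk⟩
            · rintro (hS | ⟨hne, x, hx, hk⟩)
              · exact Or.inl hS
              · rcases List.mem_cons.mp hx with rfl | hx'
                · exact Or.inl (hk ▸ hv)
                · exact Or.inr ⟨hne, x, hx', hk⟩
      · have hcb : PySem.Set.contains vis (keepA n d cur p) = false := by
          rw [← Bool.not_eq_true, set_contains_iff]; exact hv
        have hrw : expandA n d cur (p :: ps) q vis =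
            expandA n d cur ps (q ++ [keepA n d cur p]) (PySem.Set.add vis (keepA n d cur p)) := by
          simp only [expandA, hz, if_false, hcb, Bool.false_eq_true, if_false]
        have hnd' : (q ++ [keepA n d cur p]).Nodup := by
          refine List.Nodup.append hnd (List.nodup_singleton _) ?_
          intro a ha hb
          rw [List.mem_singleton] at hb
          exact hv (hb ▸ hsub a ha)
        have hsub' : ∀ S ∈ q ++ [keepA n d cur p], S ∈ PySem.Set.add vis (keepA n d cur p) := by
          intro S hS
          rcases List.mem_append.mp hS with hS' | hS'
          · exact (PySem.Set.mem_add _ _ _).mpr (Or.inl (hsub S hS'))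
          · exact (PySem.Set.mem_add _ _ _).mpr (Or.inr (List.mem_singleton.mp hS'))
        obtain ⟨ihnone, ihsome⟩ := ih (q ++ [keepA n d cur p]) (PySem.Set.add vis (keepA n d cur p)) hnd' hsub'
        rw [hrw]
        constructor
        · rw [ihnone]
          constructor
          · rintro ⟨x, hx, hk⟩; exact ⟨x, List.mem_cons_of_mem p hx, hk⟩
          · rintro ⟨x, hx, hk⟩
            rcases List.mem_cons.mp hx with rfl | hx'
            · exact absurd hk hz'
            · exact ⟨x, hx', hk⟩
        · rintro q' vis' h
          obtain ⟨h1, h2, h3, h4⟩ := ihsome q' vis' h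
          refine ⟨h1, h2, ?_, ?_⟩
          · intro S
            rw [h3 S]
            constructor
            · rintro (hS | ⟨hne, hnv, x, hx, hk⟩)
              · rcases List.mem_append.mp hS with hS' | hS'
                · exact Or.inl hS'
                · have heq := List.mem_singleton.mp hS'
                  subst heq
                  exact Or.inr ⟨hz', hv, p, List.mem_cons_self .., rfl⟩
              · have hnv' : S ∉ vis := fun h' => hnv ((PySem.Set.mem_add _ _ _).mpr (Or.inl h'))
                exact Or.inr ⟨hne, hnv', x, List.mem_cons_of_mem p hx, hk⟩
            · rintro (hS | ⟨hne, hnv, x, hx, hk⟩)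
              · exact Or.inl (List.mem_append.mpr (Or.inl hS))
              · rcases List.mem_cons.mp hx with rfl | hx'
                · exact Or.inl (List.mem_append.mpr (Or.inr (by simp [hk])))
                · by_cases hSt : S = keepA n d cur p
                  · exact Or.inl (List.mem_append.mpr (Or.inr (by simp [hSt])))
                  · have : S ∉ PySem.Set.add vis (keepA n d cur p) := by
                      rw [PySem.Set.mem_add]
                      rintro (h' | h')
                      · exact hnv h'
                      · exact hSt h'
                    exact Or.inr ⟨hne, this, x, hx', hk⟩
          · intro S
            rw [h4 S]
            constructor
            · rintro (hS | ⟨hne, x, hx, hk⟩)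
              · rcases (PySem.Set.mem_add _ _ _).mp hS with hS' | hS'
                · exact Or.inl hS'
                · subst hS'
                  exact Or.inr ⟨hz', p, List.mem_cons_self .., rfl⟩
              · exact Or.inr ⟨hne, x, List.mem_cons_of_mem p hx, hk⟩
            · rintro (hS | ⟨hne, x, hx, hk⟩)
              · exact Or.inl ((PySem.Set.mem_add _ _ _).mpr (Or.inl hS))
              · rcases List.mem_cons.mp hx with rfl | hx'
                · exact Or.inl ((PySem.Set.mem_add _ _ _).mpr (Or.inr hk.symm))
                · exact Or.inr ⟨hne, x, hx', hk⟩

theorem levelA_spec (n d : Int) :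
    ∀ (olds news : List (List Int)) (vis : PySem.Set (List Int)),
      news.Nodup → (∀ S ∈ news, S ∈ vis) →
      ((levelA n d olds news vis = none ↔ ∃ cur ∈ olds, ∃ p ∈ cur, keepA n d cur p = []) ∧
       ∀ q' vis', levelA n d olds news vis = some (q', vis') →
         q'.Nodup ∧ (∀ S ∈ q', S ∈ vis') ∧
         (∀ S, S ∈ q' ↔ S ∈ news ∨ (S ≠ [] ∧ S ∉ vis ∧ ∃ cur ∈ olds, ∃ p ∈ cur, keepA n d cur p = S)) ∧
         (∀ S, S ∈ vis' ↔ S ∈ vis ∨ (S ≠ [] ∧ ∃ cur ∈ olds, ∃ p ∈ cur, keepA n d cur p = S))) := by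
  intro olds
  induction olds with
  | nil =>
    intro news vis hnd hsub
    refine ⟨by simp [levelA], ?_⟩
    rintro q' vis' h
    simp only [levelA, Option.some.injEq, Prod.mk.injEq] at h
    obtain ⟨rfl, rfl⟩ := h
    exact ⟨hnd, hsub, by simp, by simp⟩
  | cons cur olds ih =>
    intro news vis hnd hsub
    obtain ⟨enone, esome⟩ := expandA_spec n d cur cur news vis hnd hsub
    cases hE : expandA n d cur cur news vis with
    | none =>
      have hrw : levelA n d (cur :: olds) news vis = none := by
        simp only [levelA, hE]
      obtain ⟨p, hp, hk⟩ := enone.mp hE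
      refine ⟨?_, by rintro q' vis' h; rw [hrw] at h; cases h⟩
      rw [hrw]
      simp only [true_iff]
      exact ⟨cur, List.mem_cons_self .., p, hp, hk⟩
    | some r =>
      obtain ⟨news', vis'⟩ := r
      have hnoempty : ¬ ∃ p ∈ cur, keepA n d cur p = [] := by
        intro h
        rw [← enone] at h
        rw [hE] at h
        cases h
      obtain ⟨h1, h2, h3, h4⟩ := esome news' vis' hE
      have hrw : levelA n d (cur :: olds) news vis = levelA n d olds news' vis' := by
        simp only [levelA, hE]
      obtain ⟨inone, isome⟩ := ih news' vis' h1 h2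
      rw [hrw]
      constructor
      · rw [inone]
        constructor
        · rintro ⟨c, hc, hp⟩; exact ⟨c, List.mem_cons_of_mem cur hc, hp⟩
        · rintro ⟨c, hc, hp⟩
          rcases List.mem_cons.mp hc with rfl | hc'
          · exact absurd hp hnoempty
          · exact ⟨c, hc', hp⟩
      · rintro q' vis'' h
        obtain ⟨g1, g2, g3, g4⟩ := isome q' vis'' h
        refine ⟨g1, g2, ?_, ?_⟩
        · intro S
          rw [g3 S]
          constructor
          · rintro (hS | ⟨hne, hnv, c, hc, p, hp, hk⟩)
            · rcases (h3 S).mp hS with hS' | ⟨hne, hnv, p, hp, hk⟩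
              · exact Or.inl hS'
              · exact Or.inr ⟨hne, hnv, cur, List.mem_cons_self .., p, hp, hk⟩
            · have hnv2 : S ∉ vis := fun h' => hnv ((h4 S).mpr (Or.inl h'))
              exact Or.inr ⟨hne, hnv2, c, List.mem_cons_of_mem cur hc, p, hp, hk⟩
          · rintro (hS | ⟨hne, hnv, c, hc, p, hp, hk⟩)
            · exact Or.inl ((h3 S).mpr (Or.inl hS))
            · rcases List.mem_cons.mp hc with rfl | hc'
              · exact Or.inl ((h3 S).mpr (Or.inr ⟨hne, hnv, p, hp, hk⟩))
              · by_cases hSv : S ∈ vis'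
                · rcases (h4 S).mp hSv with h' | ⟨hne', p', hp', hk'⟩
                  · exact absurd h' hnv
                  · exact Or.inl ((h3 S).mpr (Or.inr ⟨hne', hnv, p', hp', hk'⟩))
                · exact Or.inr ⟨hne, hSv, c, hc', p, hp, hk⟩
        · intro S
          rw [g4 S]
          constructor
          · rintro (hS | ⟨hne, c, hc, p, hp, hk⟩)
            · rcases (h4 S).mp hS with hS' | ⟨hne, p, hp, hk⟩
              · exact Or.inl hS'
              · exact Or.inr ⟨hne, cur, List.mem_cons_self .., p, hp, hk⟩
            · exact Or.inr ⟨hne, c, List.mem_cons_of_mem cur hc, p, hp, hk⟩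
          · rintro (hS | ⟨hne, c, hc, p, hp, hk⟩)
            · exact Or.inl ((h4 S).mpr (Or.inl hS))
            · rcases List.mem_cons.mp hc with rfl | hc'
              · exact Or.inl ((h4 S).mpr (Or.inr ⟨hne, p, hp, hk⟩))
              · exact Or.inr ⟨hne, c, hc', p, hp, hk⟩

theorem bfsA_run (n : Int) (weak ds : List Int) :
    ∀ (rest : List Int) (i : Nat) (q : List (List Int)) (vis : PySem.Set (List Int)),
      rest = ds.drop i → q.Nodup →
      (∀ S, S ∈ q ↔ Fr n weak ds i S) →
      (∀ S, S ∈ vis ↔ Vi n weak ds i S) →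
      ((∀ j, i ≤ j → j < ds.length → ¬ Hit n weak ds j) → bfsA n rest (i : Int) q vis = -1) ∧
      (∀ j0, i ≤ j0 → j0 < ds.length → Hit n weak ds j0 →
        (∀ j, i ≤ j → j < j0 → ¬ Hit n weak ds j) → bfsA n rest (i : Int) q vis = (j0 : Int) + 1) := by
  intro rest
  induction rest with
  | nil =>
    intro i q vis hdrop hnd hq hv
    have hlen : ds.length ≤ i := List.drop_eq_nil_iff.mp hdrop.symm
    refine ⟨fun _ => rfl, ?_⟩
    intro j0 hij0 hj0 _ _
    omega
  | cons d rest' ih =>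
    intro i q vis hdrop hnd hq hv
    have hget : ds[i]? = some d := by
      rw [← List.head?_drop, ← hdrop]; rfl
    have hd : dAt ds i = d := by
      simp [dAt, List.getD, hget]
    have hilen : i < ds.length := by
      by_contra h
      rw [List.getElem?_eq_none (by omega)] at hget
      cases hget
    have hdrop' : rest' = ds.drop (i + 1) := by
      rw [← List.tail_drop, ← hdrop]
      rfl
    have hqsub : ∀ S ∈ q, S ∈ vis := by
      intro S hS
      exact (hv S).mpr (Fr_subset_Vi n weak ds i S ((hq S).mp hS))
    obtain ⟨enone, esome⟩ := levelA_spec n d q [] vis List.nodup_nil (by simp)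
    cases hL : levelA n d q [] vis with
    | none =>
      have hhit : Hit n weak ds i := by
        obtain ⟨cur, hc, p, hp, hk⟩ := enone.mp hL
        exact ⟨cur, p, (hq cur).mp hc, hp, hd ▸ hk⟩
      have hrw : bfsA n (d :: rest') (i : Int) q vis = (i : Int) + 1 := by
        simp only [bfsA, hL]
      constructor
      · intro hno
        exact absurd hhit (hno i le_rfl hilen)
      · intro j0 hij0 hj0 hhit0 hmin
        have : j0 = i := by
          by_contra hne
          exact hmin i le_rfl (by omega) hhit
        rw [this, hrw]
    | some r =>
      obtain ⟨q', vis'⟩ := r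
      have hnohit : ¬ Hit n weak ds i := by
        rintro ⟨S, p, hS, hp, hk⟩
        have : ∃ cur ∈ q, ∃ p ∈ cur, keepA n d cur p = [] :=
          ⟨S, (hq S).mpr hS, p, hp, hd ▸ hk⟩
        rw [← enone, hL] at this
        cases this
      obtain ⟨g1, g2, g3, g4⟩ := esome q' vis' hL
      have hq' : ∀ S, S ∈ q' ↔ Fr n weak ds (i + 1) S := by
        intro S
        rw [g3 S]
        constructor
        · rintro (h | ⟨hne, hnv, cur, hc, p, hp, hk⟩)
          · cases h
          · exact ⟨fun h' => hnv ((hv S).mpr h'), hne, cur, p, (hq cur).mp hc, hp, hd ▸ hk⟩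
        · rintro ⟨hnv, hne, T, p, hT, hp, hk⟩
          exact Or.inr ⟨hne, fun h' => hnv ((hv S).mp h'), T, (hq T).mpr hT, p, hp, hd ▸ hk⟩
      have hv' : ∀ S, S ∈ vis' ↔ Vi n weak ds (i + 1) S := by
        intro S
        rw [g4 S, Vi_succ]
        constructor
        · rintro (h | ⟨hne, cur, hc, p, hp, hk⟩)
          · exact Or.inl ((hv S).mp h)
          · by_cases hVi : Vi n weak ds i S
            · exact Or.inl hVi
            · exact Or.inr ⟨hVi, hne, cur, p, (hq cur).mp hc, hp, hd ▸ hk⟩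
        · rintro (h | ⟨hnv, hne, T, p, hT, hp, hk⟩)
          · exact Or.inl ((hv S).mpr h)
          · exact Or.inr ⟨hne, T, (hq T).mpr hT, p, hp, hd ▸ hk⟩
      have hrw : bfsA n (d :: rest') (i : Int) q vis = bfsA n rest' ((i : Int) + 1) q' vis' := by
        simp only [bfsA, hL]
      have hcast : ((i : Int) + 1) = ((i + 1 : Nat) : Int) := by push_cast; ring
      obtain ⟨c1, c2⟩ := ih (i + 1) q' vis' hdrop' g1 hq' hv'
      rw [hrw, hcast]
      constructor
      · intro hno
        exact c1 (fun j hj hjl => hno j (by omega) hjl)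
      · intro j0 hij0 hj0 hhit0 hmin
        have hij0' : i + 1 ≤ j0 := by
          rcases Nat.eq_or_lt_of_le hij0 with rfl | h
          · exact absurd hhit0 hnohit
          · omega
        exact c2 j0 hij0' hj0 hhit0 (fun j hj hjl => hmin j (by omega) hjl)

-- real events: some level-i parent produces S
theorem EvPlus_nil (E : Nat → List Int → Prop) (n d : Int) (i : Nat) (t : List Int) :
    ∀ i' S, EvPlus E n d i t [] i' S ↔ E i' S := by
  intro i' S; simp [EvPlus]

theorem EvPlus_cons (E : Nat → List Int → Prop) (n d : Int) (i : Nat) (t : List Int)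
    (p : Int) (ps : List Int) : ∀ i' S,
    EvPlus E n d i t (p :: ps) i' S ↔
      EvPlus (fun i'' S' => E i'' S' ∨ (i'' = i ∧ keepA n d t p = S')) n d i t ps i' S := by
  intro i' S
  simp only [EvPlus, List.mem_cons]
  constructor
  · rintro (h | ⟨rfl, x, (rfl | hx), hk⟩)
    · exact Or.inl (Or.inl h)
    · exact Or.inl (Or.inr ⟨rfl, hk⟩)
    · exact Or.inr ⟨rfl, x, hx, hk⟩
  · rintro ((h | ⟨rfl, hk⟩) | ⟨rfl, x, hx, hk⟩)
    · exact Or.inl h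
    · exact Or.inr ⟨rfl, p, Or.inl rfl, hk⟩
    · exact Or.inr ⟨rfl, x, Or.inr hx, hk⟩

theorem LvInv_congr (weak : List Int) (E E' : Nat → List Int → Prop)
    (lv : PySem.Dict (List Int) Int)
    (h : ∀ i S, S ≠ [] → (E i S ↔ E' i S)) (hI : LvInv weak E lv) : LvInv weak E' lv := by
  intro S v
  rw [hI S v]
  by_cases hS : S = []
  · subst hS
    constructor
    · rintro (h' | ⟨-, h', -⟩)
      · exact Or.inl h'
      · exact absurd rfl h'
    · rintro (h' | ⟨-, h', -⟩)
      · exact Or.inl h'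
      · exact absurd rfl h'
  · constructor
    · rintro (h' | ⟨h1, h2, ⟨i, hi, hv⟩, hb⟩)
      · exact Or.inl h'
      · exact Or.inr ⟨h1, h2, ⟨i, (h i S hS).mp hi, hv⟩, fun i hi => hb i ((h i S hS).mpr hi)⟩
    · rintro (h' | ⟨h1, h2, ⟨i, hi, hv⟩, hb⟩)
      · exact Or.inl h'
      · exact Or.inr ⟨h1, h2, ⟨i, (h i S hS).mpr hi, hv⟩, fun i hi => hb i ((h i S hS).mp hi)⟩

theorem BestInv_congr (E E' : Nat → List Int → Prop) (best : Option Int)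
    (h : ∀ i, E i [] ↔ E' i []) (hI : BestInv E best) : BestInv E' best := by
  rcases hI with ⟨h1, h2⟩ | ⟨b, h1, ⟨i, hi, hv⟩, hb⟩
  · exact Or.inl ⟨h1, fun i hi => h2 i ((h i).mpr hi)⟩
  · exact Or.inr ⟨b, h1, ⟨i, (h i).mp hi, hv⟩, fun i hi => hb i ((h i).mpr hi)⟩

-- an existing production event forces a dict entry (the running minimum exists)
theorem LvInv_dom_of_event (weak : List Int) (E : Nat → List Int → Prop)
    (lv : PySem.Dict (List Int) Int) (hI : LvInv weak E lv) (S : List Int)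
    (hS : S ≠ weak) (hne : S ≠ []) (i : Nat) (hE : E i S) :
    ∃ v, lv.get? S = some v := by
  have hnonempty : {j : Nat | E j S}.Nonempty := ⟨i, hE⟩
  refine ⟨((sInf {j : Nat | E j S} : Nat) : Int) + 1, ?_⟩
  rw [hI S _]
  refine Or.inr ⟨hS, hne, ⟨sInf {j : Nat | E j S}, Nat.sInf_mem hnonempty, rfl⟩, ?_⟩
  intro j hj
  have := Nat.sInf_le (show j ∈ {j : Nat | E j S} from hj)
  omega

theorem getD_modify_list (l : List (List (List Int))) (i j : Nat) (f : List (List Int) → List (List Int))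
    (h : i < l.length) :
    (l.modify i f).getD j [] = if j = i then f (l.getD i []) else l.getD j [] := by
  simp only [List.getD, List.getElem?_modify]
  by_cases hj : i = j
  · subst hj; simp [List.getElem?_eq_getElem h]
  · simp only [hj, if_false, Option.map_eq_map, Option.map_id', if_neg (Ne.symm hj)]

theorem stepB_spec (n : Int) (weak ds : List Int) (t : List Int) (i : Nat)
    (hi : i < ds.length) (hFr : Fr n weak ds i t) :
    ∀ (ps : List Int) (E : Nat → List Int → Prop),
      (∀ i' S, E i' S → ProdFrom n weak ds (fun _ => True) i' S) →
      (∀ p ∈ ps, p ∈ t) →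
    ∀ (lv : PySem.Dict (List Int) Int) (bks : List (List (List Int))) (best : Option Int),
      LvInv weak E lv → BksInv lv bks weak.length → BestInv E best →
      LvInv weak (EvPlus E n (dAt ds i) i t ps)
          (stepB n (dAt ds i) (i : Int) t ps (lv, bks, best)).1 ∧
      BksInv (stepB n (dAt ds i) (i : Int) t ps (lv, bks, best)).1
          (stepB n (dAt ds i) (i : Int) t ps (lv, bks, best)).2.1 weak.length ∧
      BestInv (EvPlus E n (dAt ds i) i t ps)
          (stepB n (dAt ds i) (i : Int) t ps (lv, bks, best)).2.2 := by
  intro ps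
  induction ps with
  | nil =>
    intro E hE hps lv bks best hL hB hBe
    simp only [stepB]
    exact ⟨LvInv_congr weak E _ lv (fun i' S _ => (EvPlus_nil E n _ i t i' S).symm) hL, hB,
      BestInv_congr E _ best (fun i' => (EvPlus_nil E n _ i t i' []).symm) hBe⟩
  | cons p ps ih =>
    intro E hE hps lv bks best hL hB hBe
    have hp : p ∈ t := hps p (List.mem_cons_self ..)
    have hpt : ∀ q ∈ ps, q ∈ t := fun q hq => hps q (List.mem_cons_of_mem p hq)
    have htlen : t.length ≤ weak.length := (Fr_sublist n weak ds i t hFr).length_le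
    have hchild := keepB_eq_keepA n (dAt ds i) t p
    have hclen : (keepB n (dAt ds i) t p).length < t.length := by
      rw [hchild]; exact keep_length_lt n (dAt ds i) t p hp
    have hcw : keepB n (dAt ds i) t p ≠ weak := by
      intro h
      have := congrArg List.length h
      omega
    -- the one new event
    set E1 : Nat → List Int → Prop :=
      fun i'' S' => E i'' S' ∨ (i'' = i ∧ keepA n (dAt ds i) t p = S') with hE1def
    have hE1 : ∀ i' S, E1 i' S → ProdFrom n weak ds (fun _ => True) i' S := by
      rintro i' S (h | ⟨rfl, hk⟩)
      · exact hE i' S h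
      · exact ⟨hi, t, p, trivial, hFr, hp, hk⟩
    have hcongr : ∀ i' S, EvPlus E n (dAt ds i) i t (p :: ps) i' S ↔ EvPlus E1 n (dAt ds i) i t ps i' S :=
      EvPlus_cons E n (dAt ds i) i t p ps
    by_cases hz : (keepB n (dAt ds i) t p).length = 0
    · -- child = []: best is relaxed
      have hznil : keepA n (dAt ds i) t p = [] := by
        rw [← hchild]; exact List.length_eq_zero_iff.mp hz
      have hL1 : LvInv weak E1 lv := by
        refine LvInv_congr weak E E1 lv ?_ hL
        rintro i' S hS
        constructor
        · exact Or.inl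
        · rintro (h | ⟨rfl, hk⟩)
          · exact h
          · exact absurd (hznil ▸ hk).symm hS
      have key : ∀ (b0 b2 : Option Int), BestInv E1 b2 →
          stepB n (dAt ds i) (i : Int) t (p :: ps) (lv, bks, b0) =
            stepB n (dAt ds i) (i : Int) t ps (lv, bks, b2) →
          LvInv weak (EvPlus E n (dAt ds i) i t (p :: ps))
              (stepB n (dAt ds i) (i : Int) t (p :: ps) (lv, bks, b0)).1 ∧
          BksInv (stepB n (dAt ds i) (i : Int) t (p :: ps) (lv, bks, b0)).1
              (stepB n (dAt ds i) (i : Int) t (p :: ps) (lv, bks, b0)).2.1 weak.length ∧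
          BestInv (EvPlus E n (dAt ds i) i t (p :: ps))
              (stepB n (dAt ds i) (i : Int) t (p :: ps) (lv, bks, b0)).2.2 := by
        intro b0 b2 hBe2 hrw
        rw [hrw]
        obtain ⟨g1, g2, g3⟩ := ih E1 hE1 hpt lv bks b2 hL1 hB hBe2
        exact ⟨LvInv_congr weak _ _ _ (fun i' S _ => (hcongr i' S).symm) g1, g2,
          BestInv_congr _ _ _ (fun i' => (hcongr i' []).symm) g3⟩
      cases hbest : best with
      | none =>
        refine key none (some ((i : Int) + 1)) ?_ (by simp only [stepB, hz, if_true])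
        rcases hbest ▸ hBe with ⟨-, h2⟩ | ⟨b, hb', -⟩
        · refine Or.inr ⟨(i : Int) + 1, rfl, ⟨i, Or.inr ⟨rfl, hznil⟩, rfl⟩, ?_⟩
          rintro i' (h | ⟨rfl, -⟩)
          · exact absurd h (h2 i')
          · omega
        · cases hb'
      | some b =>
        obtain ⟨hnone, -⟩ | ⟨b', hb', hat, hbd⟩ := hbest ▸ hBe
        · cases hnone
        have hbb : b = b' := by injection hb'
        subst hbb
        by_cases hlt : (i : Int) + 1 < b
        · refine key (some b) (some ((i : Int) + 1)) ?_ (by simp only [stepB, hz, if_true, hlt, if_true])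
          refine Or.inr ⟨(i : Int) + 1, rfl, ⟨i, Or.inr ⟨rfl, hznil⟩, rfl⟩, ?_⟩
          rintro i' (h | ⟨rfl, -⟩)
          · have := hbd i' h; omega
          · omega
        · refine key (some b) (some b) ?_ (by simp only [stepB, hz, if_true, hlt, if_false])
          obtain ⟨i0, hi0, hv0⟩ := hat
          refine Or.inr ⟨b, rfl, ⟨i0, Or.inl hi0, hv0⟩, ?_⟩
          rintro i' (h | ⟨rfl, -⟩)
          · exact hbd i' h
          · omega
    · have hznil : keepA n (dAt ds i) t p ≠ [] := by
        rw [← hchild]; intro h; exact hz (by simp [h])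
      have hL1body : ∀ (lv' : PySem.Dict (List Int) Int), LvInv weak E1 lv' →
          True := fun _ _ => trivial
      have hEcongr : ∀ i' S, S ≠ keepA n (dAt ds i) t p → (E i' S ↔ E1 i' S) := by
        intro i' S hS
        constructor
        · exact Or.inl
        · rintro (h | ⟨rfl, hk⟩)
          · exact h
          · exact absurd hk.symm (by simpa using hS)
      cases hget : PySem.Dict.get? lv (keepB n (dAt ds i) t p) with
      | none =>
        have hrw : stepB n (dAt ds i) (i : Int) t (p :: ps) (lv, bks, best) =
            stepB n (dAt ds i) (i : Int) t ps
              (PySem.Dict.insert lv (keepB n (dAt ds i) t p) ((i : Int) + 1),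
               bks.modify (keepB n (dAt ds i) t p).length (fun b => b ++ [keepB n (dAt ds i) t p]),
               best) := by
          simp only [stepB, hz, if_false, hget]
        rw [hrw]
        have hnoev : ∀ i', ¬ E i' (keepA n (dAt ds i) t p) := by
          intro i' h
          obtain ⟨v, hv⟩ := LvInv_dom_of_event weak E lv hL _ (hchild ▸ hcw) hznil i' h
          rw [hchild] at hget
          rw [hget] at hv
          cases hv
        have hL1 : LvInv weak E1 (PySem.Dict.insert lv (keepB n (dAt ds i) t p) ((i : Int) + 1)) := by
          intro S v
          rw [PySem.Dict.get?_insert]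
          by_cases hS : S = keepB n (dAt ds i) t p
          · subst hS
            rw [if_pos rfl]
            constructor
            · intro h
              have hv : v = (i : Int) + 1 := by injection h; omega
              refine Or.inr ⟨hcw, hchild ▸ hznil, ⟨i, Or.inr ⟨rfl, hchild⟩, hv⟩, ?_⟩
              rintro i' (h' | ⟨rfl, -⟩)
              · exact absurd (hchild ▸ h') (hnoev i')
              · omega
            · rintro (⟨h1, -⟩ | ⟨-, -, ⟨i', hi', hv'⟩, -⟩)
              · exact absurd h1 hcw
              · rcases hi' with h' | ⟨rfl, -⟩
                · exact absurd (hchild ▸ h') (hnoev i')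
                · rw [hv']
          · rw [if_neg hS, hL S v]
            have hSne : S ≠ keepA n (dAt ds i) t p := hchild ▸ hS
            constructor
            · rintro (h | ⟨h1, h2, ⟨i', hi', hv'⟩, hb⟩)
              · exact Or.inl h
              · exact Or.inr ⟨h1, h2, ⟨i', (hEcongr i' S hSne).mp hi', hv'⟩,
                  fun i'' hi'' => hb i'' ((hEcongr i'' S hSne).mpr hi'')⟩
            · rintro (h | ⟨h1, h2, ⟨i', hi', hv'⟩, hb⟩)
              · exact Or.inl h
              · exact Or.inr ⟨h1, h2, ⟨i', (hEcongr i' S hSne).mpr hi', hv'⟩,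
                  fun i'' hi'' => hb i'' ((hEcongr i'' S hSne).mp hi'')⟩
        have hB1 : BksInv (PySem.Dict.insert lv (keepB n (dAt ds i) t p) ((i : Int) + 1))
            (bks.modify (keepB n (dAt ds i) t p).length (fun b => b ++ [keepB n (dAt ds i) t p]))
            weak.length := by
          obtain ⟨hlen, hbk⟩ := hB
          have hidx : (keepB n (dAt ds i) t p).length < bks.length := by omega
          refine ⟨by rw [List.length_modify]; exact hlen, ?_⟩
          intro l
          rw [getD_modify_list _ _ _ _ hidx]
          by_cases hl : l = (keepB n (dAt ds i) t p).length
          · rw [if_pos hl]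
            have hnotin : keepB n (dAt ds i) t p ∉ bks.getD (keepB n (dAt ds i) t p).length [] := by
              intro h
              obtain ⟨-, ⟨v, hv⟩⟩ := ((hbk _).2 _).mp h
              rw [hget] at hv
              cases hv
            constructor
            · exact List.Nodup.append ((hbk _).1) (List.nodup_singleton _)
                (by rintro a ha hb; rw [List.mem_singleton] at hb; exact hnotin (hb ▸ ha))
            · intro S
              rw [List.mem_append, List.mem_singleton, (hbk _).2 S, PySem.Dict.get?_insert]
              constructor
              · rintro (⟨h1, v, hv⟩ | rfl)
                · refine ⟨hl ▸ h1, v, ?_⟩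
                  rw [if_neg ?_]
                  · exact hv
                  · intro h
                    rw [h, hget] at hv
                    cases hv
                · exact ⟨hl.symm, (i : Int) + 1, by rw [if_pos rfl]⟩
              · rintro ⟨h1, v, hv⟩
                by_cases hS : S = keepB n (dAt ds i) t p
                · exact Or.inr hS
                · rw [if_neg hS] at hv
                  exact Or.inl ⟨hl ▸ h1, v, hv⟩
          · rw [if_neg hl]
            constructor
            · exact (hbk l).1
            · intro S
              rw [(hbk l).2 S, PySem.Dict.get?_insert]
              constructor
              · rintro ⟨h1, v, hv⟩
                refine ⟨h1, v, ?_⟩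
                rw [if_neg ?_]
                · exact hv
                · intro h
                  rw [h, hget] at hv
                  cases hv
              · rintro ⟨h1, v, hv⟩
                by_cases hS : S = keepB n (dAt ds i) t p
                · subst hS; exact absurd h1.symm hl
                · rw [if_neg hS] at hv
                  exact ⟨h1, v, hv⟩
        have hBe1 : BestInv E1 best :=
          BestInv_congr E E1 best (fun i' => hEcongr i' [] (Ne.symm hznil)) hBe
        obtain ⟨g1, g2, g3⟩ := ih E1 hE1 hpt _ _ _ hL1 hB1 hBe1
        exact ⟨LvInv_congr weak _ _ _ (fun i' S _ => (hcongr i' S).symm) g1, g2,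
          BestInv_congr _ _ _ (fun i' => (hcongr i' []).symm) g3⟩
      | some c =>
        -- existing entry: c is the min over E-events into child
        have hcE := (hL _ c).mp (hchild ▸ hget)
        rcases hcE with ⟨h1, -⟩ | ⟨-, -, ⟨i0, hi0, hv0⟩, hbnd⟩
        · exact absurd h1 (hchild ▸ hcw)
        by_cases hlt : (i : Int) + 1 < c
        · have hrw : stepB n (dAt ds i) (i : Int) t (p :: ps) (lv, bks, best) =
              stepB n (dAt ds i) (i : Int) t ps
                (PySem.Dict.insert lv (keepB n (dAt ds i) t p) ((i : Int) + 1), bks, best) := by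
            simp only [stepB, hz, if_false, hget, hlt, if_true]
          rw [hrw]
          have hL1 : LvInv weak E1 (PySem.Dict.insert lv (keepB n (dAt ds i) t p) ((i : Int) + 1)) := by
            intro S v
            rw [PySem.Dict.get?_insert]
            by_cases hS : S = keepB n (dAt ds i) t p
            · subst hS
              rw [if_pos rfl]
              constructor
              · intro h
                have hv : v = (i : Int) + 1 := by injection h; omega
                refine Or.inr ⟨hcw, hchild ▸ hznil, ⟨i, Or.inr ⟨rfl, hchild⟩, hv⟩, ?_⟩
                rintro i' (h' | ⟨rfl, -⟩)
                · have := hbnd i' (hchild ▸ h')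
                  omega
                · omega
              · rintro (⟨hw, -⟩ | ⟨-, -, ⟨i', hi', hv'⟩, hb'⟩)
                · exact absurd hw hcw
                · have hle1 : v ≤ (i : Int) + 1 := hb' i (Or.inr ⟨rfl, hchild⟩)
                  rcases hi' with h' | ⟨rfl, -⟩
                  · have := hbnd i' (hchild ▸ h')
                    omega
                  · rw [hv']
            · rw [if_neg hS, hL S v]
              have hSne : S ≠ keepA n (dAt ds i) t p := hchild ▸ hS
              constructor
              · rintro (h | ⟨g1, g2, ⟨i', hi', hv'⟩, hb⟩)
                · exact Or.inl h
                · exact Or.inr ⟨g1, g2, ⟨i', (hEcongr i' S hSne).mp hi', hv'⟩,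
                    fun i'' hi'' => hb i'' ((hEcongr i'' S hSne).mpr hi'')⟩
              · rintro (h | ⟨g1, g2, ⟨i', hi', hv'⟩, hb⟩)
                · exact Or.inl h
                · exact Or.inr ⟨g1, g2, ⟨i', (hEcongr i' S hSne).mpr hi', hv'⟩,
                    fun i'' hi'' => hb i'' ((hEcongr i'' S hSne).mp hi'')⟩
          have hB1 : BksInv (PySem.Dict.insert lv (keepB n (dAt ds i) t p) ((i : Int) + 1)) bks
              weak.length := by
            obtain ⟨hlen, hbk⟩ := hB
            refine ⟨hlen, ?_⟩
            intro l
            refine ⟨(hbk l).1, ?_⟩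
            intro S
            rw [(hbk l).2 S, PySem.Dict.get?_insert]
            by_cases hS : S = keepB n (dAt ds i) t p
            · subst hS
              simp only [if_pos rfl]
              constructor
              · rintro ⟨g, -⟩; exact ⟨g, _, rfl⟩
              · rintro ⟨g, -⟩; exact ⟨g, c, hchild ▸ hget⟩
            · rw [if_neg hS]
          have hBe1 : BestInv E1 best :=
            BestInv_congr E E1 best (fun i' => hEcongr i' [] (Ne.symm hznil)) hBe
          obtain ⟨g1, g2, g3⟩ := ih E1 hE1 hpt _ _ _ hL1 hB1 hBe1
          exact ⟨LvInv_congr weak _ _ _ (fun i' S _ => (hcongr i' S).symm) g1, g2,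
            BestInv_congr _ _ _ (fun i' => (hcongr i' []).symm) g3⟩
        · -- c ≤ i+1: nothing changes; c is still the minimum
          have hc_le : c ≤ (i : Int) + 1 := by omega
          have hrw : stepB n (dAt ds i) (i : Int) t (p :: ps) (lv, bks, best) =
              stepB n (dAt ds i) (i : Int) t ps (lv, bks, best) := by
            simp only [stepB, hz, if_false, hget, hlt, if_false]
          rw [hrw]
          have hL1 : LvInv weak E1 lv := by
            intro S v
            by_cases hS : S = keepB n (dAt ds i) t p
            · subst hS
              constructor
              · intro h
                have hvc : v = c := by
                  rw [hget] at h
                  injection h with h'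
                  exact h'.symm
                subst hvc
                refine Or.inr ⟨hcw, hchild ▸ hznil, ⟨i0, Or.inl (hchild ▸ hi0), hv0⟩, ?_⟩
                rintro i' (h' | ⟨rfl, -⟩)
                · exact hbnd i' (hchild ▸ h')
                · exact hc_le
              · rintro (⟨hw, -⟩ | ⟨-, -, ⟨i', hi', hv'⟩, hb'⟩)
                · exact absurd hw hcw
                · have hvc : v = c := by
                    have hvle : v ≤ (i0 : Int) + 1 := hb' i0 (Or.inl (hchild ▸ hi0))
                    have hcle : c ≤ v := by
                      rcases hi' with h'' | ⟨rfl, -⟩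
                      · have := hbnd i' (hchild ▸ h'')
                        omega
                      · omega
                    omega
                  rw [hget, hvc]
            · have hSne : S ≠ keepA n (dAt ds i) t p := hchild ▸ hS
              rw [hL S v]
              constructor
              · rintro (h | ⟨g1, g2, ⟨i', hi', hv'⟩, hb⟩)
                · exact Or.inl h
                · exact Or.inr ⟨g1, g2, ⟨i', (hEcongr i' S hSne).mp hi', hv'⟩,
                    fun i'' hi'' => hb i'' ((hEcongr i'' S hSne).mpr hi'')⟩
              · rintro (h | ⟨g1, g2, ⟨i', hi', hv'⟩, hb⟩)
                · exact Or.inl h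
                · exact Or.inr ⟨g1, g2, ⟨i', (hEcongr i' S hSne).mpr hi', hv'⟩,
                    fun i'' hi'' => hb i'' ((hEcongr i'' S hSne).mp hi'')⟩
          have hBe1 : BestInv E1 best :=
            BestInv_congr E E1 best (fun i' => hEcongr i' [] (Ne.symm hznil)) hBe
          obtain ⟨g1, g2, g3⟩ := ih E1 hE1 hpt _ _ _ hL1 hB hBe1
          exact ⟨LvInv_congr weak _ _ _ (fun i' S _ => (hcongr i' S).symm) g1, g2,
            BestInv_congr _ _ _ (fun i' => (hcongr i' []).symm) g3⟩

theorem ProdFrom_mono (n : Int) (weak ds : List Int) (P Q : List Int → Prop)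
    (h : ∀ T, P T → Q T) : ∀ i S, ProdFrom n weak ds P i S → ProdFrom n weak ds Q i S := by
  rintro i S ⟨hi, T, p, hP, hFr, hp, hk⟩
  exact ⟨hi, T, p, h T hP, hFr, hp, hk⟩

theorem prod_Vi (n : Int) (weak ds : List Int) (i : Nat) (S : List Int) (hne : S ≠ [])
    (h : ∃ T p, Fr n weak ds i T ∧ p ∈ T ∧ keepA n (dAt ds i) T p = S) :
    Vi n weak ds (i + 1) S := by
  by_cases hv : Vi n weak ds i S
  · exact Or.inl hv
  · exact Or.inr ⟨hv, hne, h⟩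

-- ordering helpers on the running best (none = no candidate yet = +infinity)
def BVlt (best : Option Int) (x : Int) : Prop := ∀ b, best = some b → x < b

def BLe (b' b : Option Int) : Prop := ∀ v, b = some v → ∃ v', b' = some v' ∧ v' ≤ v

-- every state whose level could still beat the current best has been expanded
def Dcond (n : Int) (weak ds : List Int) (Q : List Int → Prop) (best : Option Int) (l : Nat) : Prop :=
  ∀ T iT, l < T.length → iT < ds.length → Fr n weak ds iT T →
    BVlt best ((iT : Int) + 1) → Q T

theorem BLe_refl (b : Option Int) : BLe b b := fun v hv => ⟨v, hv, le_rfl⟩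

theorem BLe_trans (a b c : Option Int) (h1 : BLe a b) (h2 : BLe b c) : BLe a c := by
  intro v hv
  obtain ⟨v', hv', hle'⟩ := h2 v hv
  obtain ⟨v'', hv'', hle''⟩ := h1 v' hv'
  exact ⟨v'', hv'', le_trans hle'' hle'⟩

theorem BVlt_of_BLe (b' b : Option Int) (x : Int) (h : BLe b' b) (h' : BVlt b' x) : BVlt b x := by
  intro v hv
  obtain ⟨v', hv', hle⟩ := h v hv
  exact lt_of_lt_of_le (h' v' hv') hle

theorem not_BVlt (best : Option Int) (x : Int) (h : ¬ BVlt best x) :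
    ∃ b, best = some b ∧ b ≤ x := by
  cases best with
  | none => exact absurd (fun b hb => by cases hb) h
  | some b =>
    refine ⟨b, rfl, ?_⟩
    by_contra hgt
    exact h (fun b' hb' => by injection hb' with h'; omega)

theorem Dcond_mono (n : Int) (weak ds : List Int) (Q Q' : List Int → Prop)
    (best best' : Option Int) (l : Nat) (hQ : ∀ T, Q T → Q' T) (hb : BLe best' best)
    (h : Dcond n weak ds Q best l) : Dcond n weak ds Q' best' l :=
  fun T iT h1 h2 h3 h4 => hQ T (h T iT h1 h2 h3 (BVlt_of_BLe best' best _ hb h4))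

-- stepB only ever lowers the running best
theorem stepB_best_le (n d j : Int) (t : List Int) :
    ∀ (ps : List Int) (st : StB), BLe (stepB n d j t ps st).2.2 st.2.2 := by
  intro ps
  induction ps with
  | nil => intro st; exact BLe_refl _
  | cons p ps ih =>
    rintro ⟨lv, bks, best⟩
    by_cases hz : (keepB n d t p).length = 0
    · have hrw : stepB n d j t (p :: ps) (lv, bks, best) =
          stepB n d j t ps (lv, bks,
            (match best with
             | none => some (j + 1)
             | some b => if j + 1 < b then some (j + 1) else some b)) := by
        simp only [stepB, hz, if_true]
      rw [hrw]
      refine BLe_trans _ _ _ (ih _) ?_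
      cases best with
      | none => intro v hv; cases hv
      | some b =>
        intro v hv
        have hbv : b = v := by injection hv
        subst hbv
        show ∃ v', (if j + 1 < b then some (j + 1) else some b) = some v' ∧ v' ≤ b
        by_cases hlt : j + 1 < b
        · exact ⟨j + 1, by rw [if_pos hlt], by omega⟩
        · exact ⟨b, by rw [if_neg hlt], le_rfl⟩
    · cases hget : PySem.Dict.get? lv (keepB n d t p) with
      | none =>
        have hrw : stepB n d j t (p :: ps) (lv, bks, best) =
            stepB n d j t ps
              (PySem.Dict.insert lv (keepB n d t p) (j + 1),
               bks.modify (keepB n d t p).length (fun b => b ++ [keepB n d t p]), best) := by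
          simp only [stepB, hz, if_false, hget]
        rw [hrw]
        exact ih _
      | some c =>
        by_cases hlt : j + 1 < c
        · have hrw : stepB n d j t (p :: ps) (lv, bks, best) =
              stepB n d j t ps (PySem.Dict.insert lv (keepB n d t p) (j + 1), bks, best) := by
            simp only [stepB, hz, if_false, hget, hlt, if_true]
          rw [hrw]
          exact ih _
        · have hrw : stepB n d j t (p :: ps) (lv, bks, best) =
              stepB n d j t ps (lv, bks, best) := by
            simp only [stepB, hz, if_false, hget, hlt, if_false]
          rw [hrw]
          exact ih _

-- a dict entry is at least the state's unique BFS level; it equals it unless the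
-- best bound has already closed that level
theorem entry_level_Q (n : Int) (weak ds : List Int) (l : Nat) (Q : List Int → Prop)
    (best : Option Int) (hD : Dcond n weak ds Q best l)
    (lv : PySem.Dict (List Int) Int) (hL : LvInv weak (ProdFrom n weak ds Q) lv)
    (t : List Int) (hlen : l ≤ t.length) (hne : t ≠ []) (j : Int)
    (hget : lv.get? t = some j) :
    ∃ it : Nat, Fr n weak ds it t ∧ (∀ i', Fr n weak ds i' t → i' = it) ∧ (it : Int) ≤ j ∧
      (j = (it : Int) ∨ ∃ b, best = some b ∧ b ≤ (it : Int)) := by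
  rcases (hL t j).mp hget with ⟨hw0, hj0⟩ | ⟨hw, -, ⟨i0, hi0, hv0⟩, hbnd⟩
  · exact ⟨0, hw0, fun i' hF => Fr_unique n weak ds i' 0 t hF hw0, by omega,
      Or.inl (by simp [hj0])⟩
  · obtain ⟨hi0k, T0, p0, hPT0, hFrT0, hp0, hk0⟩ := hi0
    have hVi : Vi n weak ds (i0 + 1) t := prod_Vi n weak ds i0 t hne ⟨T0, p0, hFrT0, hp0, hk0⟩
    obtain ⟨it, hitle, hFrit⟩ := (Vi_iff n weak ds (i0 + 1) t).mp hVi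
    have huniq : ∀ i', Fr n weak ds i' t → i' = it :=
      fun i' hF => Fr_unique n weak ds i' it t hF hFrit
    have hub : ∀ i', ProdFrom n weak ds Q i' t → it ≤ i' + 1 := by
      rintro i' ⟨hi'k, T, p, hPT, hFrT, hp, hk⟩
      have := prod_Vi n weak ds i' t hne ⟨T, p, hFrT, hp, hk⟩
      obtain ⟨it', hle', hF'⟩ := (Vi_iff n weak ds (i' + 1) t).mp this
      rw [huniq it' hF'] at hle'
      exact hle'
    have hitj : (it : Int) ≤ j := by
      have h1 := hub i0 ⟨hi0k, T0, p0, hPT0, hFrT0, hp0, hk0⟩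
      omega
    have hit1 : 1 ≤ it := by
      rcases Nat.eq_zero_or_pos it with rfl | h
      · exact absurd (show t = weak from hFrit) hw
      · exact h
    obtain ⟨it0, rfl⟩ : ∃ it0, it = it0 + 1 := ⟨it - 1, by omega⟩
    obtain ⟨-, -, T1, p1, hFrT1, hp1, hk1⟩ := id hFrit
    have hit0k : it0 < ds.length := by
      have := hub i0 ⟨hi0k, T0, p0, hPT0, hFrT0, hp0, hk0⟩
      omega
    have hT1len : l < T1.length := by
      have h1 : t.length < T1.length := by
        rw [← hk1]; exact keep_length_lt n (dAt ds it0) T1 p1 hp1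
      omega
    refine ⟨it0 + 1, hFrit, huniq, hitj, ?_⟩
    by_cases hQ1 : Q T1
    · -- the defining production is recorded, so j is exactly the level
      have hev : ProdFrom n weak ds Q it0 t := ⟨hit0k, T1, p1, hQ1, hFrT1, hp1, hk1⟩
      have := hbnd it0 hev
      exact Or.inl (by omega)
    · -- the defining parent was skipped: best had already closed level it
      have hnBV : ¬ BVlt best ((it0 : Int) + 1) :=
        fun hBV => hQ1 (hD T1 it0 hT1len hit0k hFrT1 hBV)
      obtain ⟨b, hb, hble⟩ := not_BVlt best _ hnBV
      exact Or.inr ⟨b, hb, by push_cast; omega⟩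

theorem bucketB_spec (n : Int) (weak ds : List Int) (l : Nat) (hl1 : 1 ≤ l) :
    ∀ (ts : List (List Int)) (Q : List Int → Prop),
      (∀ t ∈ ts, l ≤ t.length) →
    ∀ (lv : PySem.Dict (List Int) Int) (bks : List (List (List Int))) (best : Option Int),
      LvInv weak (ProdFrom n weak ds Q) lv → BksInv lv bks weak.length →
      BestInv (ProdFrom n weak ds Q) best → Dcond n weak ds Q best l →
      ∃ Q' : List Int → Prop,
        (∀ T, Q T → Q' T) ∧ (∀ T, Q' T → Q T ∨ T ∈ ts) ∧
        LvInv weak (ProdFrom n weak ds Q')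
            (bucketB n ds (ds.length : Int) ts (lv, bks, best)).1 ∧
        BksInv (bucketB n ds (ds.length : Int) ts (lv, bks, best)).1
            (bucketB n ds (ds.length : Int) ts (lv, bks, best)).2.1 weak.length ∧
        BestInv (ProdFrom n weak ds Q')
            (bucketB n ds (ds.length : Int) ts (lv, bks, best)).2.2 ∧
        Dcond n weak ds Q' (bucketB n ds (ds.length : Int) ts (lv, bks, best)).2.2 l ∧
        BLe (bucketB n ds (ds.length : Int) ts (lv, bks, best)).2.2 best ∧
        (∀ t ∈ ts, ∀ iT, iT < ds.length → Fr n weak ds iT t →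
          BVlt (bucketB n ds (ds.length : Int) ts (lv, bks, best)).2.2 ((iT : Int) + 1) →
          Q' t) := by
  intro ts
  induction ts with
  | nil =>
    intro Q hts lv bks best hL hB hBe hD
    exact ⟨Q, fun _ h => h, fun _ h => Or.inl h, hL, hB, hBe, hD, BLe_refl _, by simp⟩
  | cons t ts ih =>
    intro Q hts lv bks best hL hB hBe hD
    have htl : l ≤ t.length := hts t (List.mem_cons_self ..)
    have htne : t ≠ [] := by
      intro h
      rw [h] at htl
      simp at htl
      omega
    cases hget : PySem.Dict.get? lv t with
    | none =>
      have hrw : bucketB n ds (ds.length : Int) (t :: ts) (lv, bks, best) =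
          bucketB n ds (ds.length : Int) ts (lv, bks, best) := by
        simp only [bucketB, hget]
      obtain ⟨Q', q1, q2, q3, q4, q5, q6, q7, q8⟩ :=
        ih Q (fun u hu => hts u (List.mem_cons_of_mem t hu)) lv bks best hL hB hBe hD
      rw [hrw]
      refine ⟨Q', q1, fun T h => (q2 T h).elim Or.inl (fun h' => Or.inr (List.mem_cons_of_mem t h')),
        q3, q4, q5, q6, q7, ?_⟩
      intro u hu iT hiT hF hBV
      rcases List.mem_cons.mp hu with rfl | hu'
      · -- no entry: the defining parent must have been skipped, closing this level
        exfalso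
        cases iT with
        | zero =>
          have : lv.get? u = some 0 := (hL u 0).mpr (Or.inl ⟨hF, rfl⟩)
          rw [hget] at this
          cases this
        | succ i0 =>
          obtain ⟨-, -, T1, p1, hFrT1, hp1, hk1⟩ := id hF
          have hT1len : l < T1.length := by
            have h1 : u.length < T1.length := by
              rw [← hk1]; exact keep_length_lt n (dAt ds i0) T1 p1 hp1
            omega
          by_cases hQ1 : Q T1
          · have hev : ProdFrom n weak ds Q i0 u :=
              ⟨by omega, T1, p1, hQ1, hFrT1, hp1, hk1⟩
            obtain ⟨v, hv⟩ := LvInv_dom_of_event weak _ lv hL u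
              (fun h => absurd (Fr_unique n weak ds (i0 + 1) 0 u hF h) (by omega)) htne i0 hev
            rw [hget] at hv
            cases hv
          · have hnBV : ¬ BVlt best ((i0 : Int) + 1) :=
              fun hBV' => hQ1 (hD T1 i0 hT1len (by omega) hFrT1 hBV')
            obtain ⟨b, hb, hble⟩ := not_BVlt best _ hnBV
            obtain ⟨b', hb', hble'⟩ := q7 b hb
            have := hBV b' hb'
            push_cast at this hble hble' ⊢
            omega
      · exact q8 u hu' iT hiT hF hBV
    | some j =>
      obtain ⟨it, hFrit, huniq, hitj, hdisj⟩ :=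
        entry_level_Q n weak ds l Q best hD lv hL t htl htne j hget
      have hcommon : ∀ (hrw : bucketB n ds (ds.length : Int) (t :: ts) (lv, bks, best) =
            bucketB n ds (ds.length : Int) ts (lv, bks, best))
          (hclosed : ∀ iT, iT < ds.length → Fr n weak ds iT t →
            BVlt best ((iT : Int) + 1) → False),
          ∃ Q' : List Int → Prop,
            (∀ T, Q T → Q' T) ∧ (∀ T, Q' T → Q T ∨ T ∈ t :: ts) ∧
            LvInv weak (ProdFrom n weak ds Q')
                (bucketB n ds (ds.length : Int) (t :: ts) (lv, bks, best)).1 ∧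
            BksInv (bucketB n ds (ds.length : Int) (t :: ts) (lv, bks, best)).1
                (bucketB n ds (ds.length : Int) (t :: ts) (lv, bks, best)).2.1 weak.length ∧
            BestInv (ProdFrom n weak ds Q')
                (bucketB n ds (ds.length : Int) (t :: ts) (lv, bks, best)).2.2 ∧
            Dcond n weak ds Q' (bucketB n ds (ds.length : Int) (t :: ts) (lv, bks, best)).2.2 l ∧
            BLe (bucketB n ds (ds.length : Int) (t :: ts) (lv, bks, best)).2.2 best ∧
            (∀ u ∈ t :: ts, ∀ iT, iT < ds.length → Fr n weak ds iT u →
              BVlt (bucketB n ds (ds.length : Int) (t :: ts) (lv, bks, best)).2.2 ((iT : Int) + 1) →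
              Q' u) := by
        intro hrw hclosed
        obtain ⟨Q', q1, q2, q3, q4, q5, q6, q7, q8⟩ :=
          ih Q (fun u hu => hts u (List.mem_cons_of_mem t hu)) lv bks best hL hB hBe hD
        rw [hrw]
        refine ⟨Q', q1, fun T h => (q2 T h).elim Or.inl (fun h' => Or.inr (List.mem_cons_of_mem t h')),
          q3, q4, q5, q6, q7, ?_⟩
        intro u hu iT hiT hF hBV
        rcases List.mem_cons.mp hu with rfl | hu'
        · exact absurd (BVlt_of_BLe _ _ _ q7 hBV) (fun h => hclosed iT hiT hF h)
        · exact q8 u hu' iT hiT hF hBV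
      by_cases hk : (ds.length : Int) ≤ j
      · -- j ≥ k: never expanded, and no level below k can be t's
        have hrw : bucketB n ds (ds.length : Int) (t :: ts) (lv, bks, best) =
            bucketB n ds (ds.length : Int) ts (lv, bks, best) := by
          simp only [bucketB, hget, hk, if_true]
        refine hcommon hrw ?_
        intro iT hiT hF hBV
        have hit : iT = it := huniq iT hF
        subst hit
        rcases hdisj with heq | ⟨b, hb, hble⟩
        · omega
        · have := hBV b hb
          omega
      · -- j < k: expand unless the best bound closes level j
        have hdgd : (PySem.List.pyGet? ds ((it : Nat) : Int)).getD 0 = dAt ds it := by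
          rw [PySem.List.pyGet?_natCast, dAt, List.getD]
        have hexpand : ∀ (hBVj : BVlt best (j + 1))
            (hrw : bucketB n ds (ds.length : Int) (t :: ts) (lv, bks, best) =
              bucketB n ds (ds.length : Int) ts
                (stepB n (dAt ds it) (it : Int) t t (lv, bks, best))),
            ∃ Q' : List Int → Prop,
              (∀ T, Q T → Q' T) ∧ (∀ T, Q' T → Q T ∨ T ∈ t :: ts) ∧
              LvInv weak (ProdFrom n weak ds Q')
                  (bucketB n ds (ds.length : Int) (t :: ts) (lv, bks, best)).1 ∧
              BksInv (bucketB n ds (ds.length : Int) (t :: ts) (lv, bks, best)).1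
                  (bucketB n ds (ds.length : Int) (t :: ts) (lv, bks, best)).2.1 weak.length ∧
              BestInv (ProdFrom n weak ds Q')
                  (bucketB n ds (ds.length : Int) (t :: ts) (lv, bks, best)).2.2 ∧
              Dcond n weak ds Q' (bucketB n ds (ds.length : Int) (t :: ts) (lv, bks, best)).2.2 l ∧
              BLe (bucketB n ds (ds.length : Int) (t :: ts) (lv, bks, best)).2.2 best ∧
              (∀ u ∈ t :: ts, ∀ iT, iT < ds.length → Fr n weak ds iT u →
                BVlt (bucketB n ds (ds.length : Int) (t :: ts) (lv, bks, best)).2.2 ((iT : Int) + 1) →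
                Q' u) := by
          intro hBVj hrw
          have hitlen : it < ds.length := by
            have hjk : ¬ (ds.length : Int) ≤ j := hk
            omega
          rw [hrw]
          obtain ⟨s1, s2, s3⟩ := stepB_spec n weak ds t it hitlen hFrit t
            (ProdFrom n weak ds Q)
            (ProdFrom_mono n weak ds Q (fun _ => True) (fun _ _ => trivial))
            (fun p hp => hp) lv bks best hL hB hBe
          have hcong1 : ∀ i S,
              EvPlus (ProdFrom n weak ds Q) n (dAt ds it) it t t i S ↔
              ProdFrom n weak ds (fun T => Q T ∨ T = t) i S := by
            intro i S
            constructor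
            · rintro (h | ⟨rfl, p, hp, hk'⟩)
              · exact ProdFrom_mono n weak ds _ _ (fun T h' => Or.inl h') i S h
              · exact ⟨hitlen, t, p, Or.inr rfl, hFrit, hp, hk'⟩
            · rintro ⟨hik, T, p, hPT, hFrT, hp, hk'⟩
              rcases hPT with h' | rfl
              · exact Or.inl ⟨hik, T, p, h', hFrT, hp, hk'⟩
              · have := huniq i hFrT
                subst this
                exact Or.inr ⟨rfl, p, hp, hk'⟩
          have hble1 : BLe (stepB n (dAt ds it) (it : Int) t t (lv, bks, best)).2.2 best :=
            stepB_best_le n (dAt ds it) (it : Int) t t (lv, bks, best)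
          have hL1 : LvInv weak (ProdFrom n weak ds (fun T => Q T ∨ T = t))
              (stepB n (dAt ds it) (it : Int) t t (lv, bks, best)).1 :=
            LvInv_congr weak _ _ _ (fun i S _ => hcong1 i S) s1
          have hBe1 : BestInv (ProdFrom n weak ds (fun T => Q T ∨ T = t))
              (stepB n (dAt ds it) (it : Int) t t (lv, bks, best)).2.2 :=
            BestInv_congr _ _ _ (fun i => hcong1 i []) s3
          have hD1 : Dcond n weak ds (fun T => Q T ∨ T = t)
              (stepB n (dAt ds it) (it : Int) t t (lv, bks, best)).2.2 l :=
            Dcond_mono n weak ds Q _ best _ l (fun T h => Or.inl h) hble1 hD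
          obtain ⟨Q'', q1, q2, q3, q4, q5, q6, q7, q8⟩ :=
            ih (fun T => Q T ∨ T = t) (fun u hu => hts u (List.mem_cons_of_mem t hu))
              (stepB n (dAt ds it) (it : Int) t t (lv, bks, best)).1
              (stepB n (dAt ds it) (it : Int) t t (lv, bks, best)).2.1
              (stepB n (dAt ds it) (it : Int) t t (lv, bks, best)).2.2
              hL1 s2 hBe1 hD1
          refine ⟨Q'', fun T h => q1 T (Or.inl h), ?_, q3, q4, q5, q6,
            BLe_trans _ _ _ q7 hble1, ?_⟩
          · intro T h
            rcases q2 T h with (h' | rfl) | h'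
            · exact Or.inl h'
            · exact Or.inr (List.mem_cons_self ..)
            · exact Or.inr (List.mem_cons_of_mem t h')
          · intro u hu iT hiT hF hBV
            rcases List.mem_cons.mp hu with rfl | hu'
            · exact q1 u (Or.inr rfl)
            · exact q8 u hu' iT hiT hF hBV
        cases best with
        | some b =>
          by_cases hble : b ≤ j + 1
          · -- skip: the best bound has closed every level t could contribute to
            have hrw : bucketB n ds (ds.length : Int) (t :: ts) (lv, bks, some b) =
                bucketB n ds (ds.length : Int) ts (lv, bks, some b) := by
              simp only [bucketB, hget, hk, if_false, hble, if_true]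
            refine hcommon hrw ?_
            intro iT hiT hF hBV
            have hit : iT = it := huniq iT hF
            subst hit
            have h1 := hBV b rfl
            rcases hdisj with heq | ⟨b2, hb2, hble2⟩
            · omega
            · have hbb2 : b = b2 := by injection hb2
              omega
          · have hBVj : BVlt (some b) (j + 1) := by
              intro b' hb'
              have : b = b' := by injection hb'
              omega
            have hjit : j = (it : Int) := by
              rcases hdisj with heq | ⟨b2, hb2, hble2⟩
              · exact heq
              · have hbb2 : b = b2 := by injection hb2
                have := hBVj b rfl
                omega
            have hble' : ¬ b ≤ (it : Int) + 1 := by rw [← hjit]; exact hble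
            have hk' : ¬ (ds.length : Int) ≤ (it : Int) := by rw [← hjit]; exact hk
            exact hexpand hBVj (by
              simp only [bucketB, hget, hjit, hk', if_false, hble', if_false, hdgd])
        | none =>
          have hBVj : BVlt none (j + 1) := fun b' hb' => by cases hb'
          have hjit : j = (it : Int) := by
            rcases hdisj with heq | ⟨b2, hb2, hble2⟩
            · exact heq
            · cases hb2
          have hk' : ¬ (ds.length : Int) ≤ (it : Int) := by rw [← hjit]; exact hk
          exact hexpand hBVj (by
            simp only [bucketB, hget, hjit, hk', if_false, hdgd])

theorem stageB_spec (n : Int) (weak ds : List Int) :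
    ∀ (l : Nat) (lv : PySem.Dict (List Int) Int) (bks : List (List (List Int)))
      (best : Option Int) (Q : List Int → Prop),
      (∀ T, Q T → l < T.length) →
      LvInv weak (ProdFrom n weak ds Q) lv →
      BksInv lv bks weak.length →
      BestInv (ProdFrom n weak ds Q) best →
      Dcond n weak ds Q best l →
      ∃ Q' : List Int → Prop,
        LvInv weak (ProdFrom n weak ds Q')
            (stageB n ds (ds.length : Int) l (lv, bks, best)).1 ∧
        BestInv (ProdFrom n weak ds Q')
            (stageB n ds (ds.length : Int) l (lv, bks, best)).2.2 ∧
        Dcond n weak ds Q' (stageB n ds (ds.length : Int) l (lv, bks, best)).2.2 0 := by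
  intro l
  induction l with
  | zero =>
    intro lv bks best Q hQlen hL hB hBe hD
    exact ⟨Q, hL, hBe, hD⟩
  | succ l ih =>
    intro lv bks best Q hQlen hL hB hBe hD
    have hrw : stageB n ds (ds.length : Int) (l + 1) (lv, bks, best) =
        stageB n ds (ds.length : Int) l
          (bucketB n ds (ds.length : Int) (bks.getD (l + 1) []) (lv, bks, best)) := by
      simp only [stageB]
    rw [hrw]
    obtain ⟨hlenb, hbk⟩ := hB
    have hts : ∀ t ∈ bks.getD (l + 1) [], l + 1 ≤ t.length := by
      intro t ht
      obtain ⟨h1, -⟩ := ((hbk (l + 1)).2 t).mp ht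
      omega
    obtain ⟨Q', q1, q2, q3, q4, q5, q6, q7, q8⟩ :=
      bucketB_spec n weak ds (l + 1) (by omega) (bks.getD (l + 1) []) Q hts lv bks best
        hL ⟨hlenb, hbk⟩ hBe hD
    have hQ'len : ∀ T, Q' T → l < T.length := by
      intro T h
      rcases q2 T h with h' | h'
      · have := hQlen T h'
        omega
      · obtain ⟨h1, -⟩ := ((hbk (l + 1)).2 T).mp h'
        omega
    have hD' : Dcond n weak ds Q'
        (bucketB n ds (ds.length : Int) (bks.getD (l + 1) []) (lv, bks, best)).2.2 l := by
      intro T iT hTlen hiT hF hBV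
      by_cases hlong : l + 1 < T.length
      · exact q6 T iT hlong hiT hF hBV
      · have hTl : T.length = l + 1 := by omega
        by_cases hmem : T ∈ bks.getD (l + 1) []
        · exact q8 T hmem iT hiT hF hBV
        · -- T has no start-of-stage entry: its defining parent was skipped earlier
          exfalso
          cases iT with
          | zero =>
            have hTw : T = weak := hF
            have : lv.get? T = some 0 := (hL T 0).mpr (Or.inl ⟨hTw, rfl⟩)
            exact hmem (((hbk (l + 1)).2 T).mpr ⟨hTl, 0, this⟩)
          | succ i0 =>
            obtain ⟨-, -, T1, p1, hFrT1, hp1, hk1⟩ := id hF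
            have hTne : T ≠ [] := by
              intro h
              rw [h] at hTl
              simp at hTl
            by_cases hQ1 : Q T1
            · have hev : ProdFrom n weak ds Q i0 T :=
                ⟨by omega, T1, p1, hQ1, hFrT1, hp1, hk1⟩
              have hTw : T ≠ weak :=
                fun h => absurd (Fr_unique n weak ds (i0 + 1) 0 T hF h) (by omega)
              obtain ⟨v, hv⟩ := LvInv_dom_of_event weak _ lv hL T hTw hTne i0 hev
              exact hmem (((hbk (l + 1)).2 T).mpr ⟨hTl, v, hv⟩)
            · have hT1len : l + 1 < T1.length := by
                have h1 : T.length < T1.length := by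
                  rw [← hk1]; exact keep_length_lt n (dAt ds i0) T1 p1 hp1
                omega
              have hnQ'1 : ¬ Q' T1 := by
                intro h
                rcases q2 T1 h with h' | h'
                · exact hQ1 h'
                · obtain ⟨h1, -⟩ := ((hbk (l + 1)).2 T1).mp h'
                  omega
              have hnBV : ¬ BVlt (bucketB n ds (ds.length : Int) (bks.getD (l + 1) [])
                  (lv, bks, best)).2.2 ((i0 : Int) + 1) :=
                fun hBV' => hnQ'1 (q6 T1 i0 hT1len (by omega) hFrT1 hBV')
              obtain ⟨b, hb, hble⟩ := not_BVlt _ _ hnBV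
              have := hBV b hb
              push_cast at this hble ⊢
              omega
    obtain ⟨Qf, r1, r2, r3⟩ := ih
      (bucketB n ds (ds.length : Int) (bks.getD (l + 1) []) (lv, bks, best)).1
      (bucketB n ds (ds.length : Int) (bks.getD (l + 1) []) (lv, bks, best)).2.1
      (bucketB n ds (ds.length : Int) (bks.getD (l + 1) []) (lv, bks, best)).2.2
      Q' hQ'len q3 q4 q5 hD'
    exact ⟨Qf, r1, r2, r3⟩

theorem solution_alt_correct (n : Int) (weak dist : List Int) :
    (let ds := PySem.List.sorted dist (fun x => x) true
     (¬ (∃ j, j < ds.length ∧ Hit n weak ds j) → solution_alt n weak dist = -1) ∧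
     (∀ j0, j0 < ds.length → Hit n weak ds j0 → (∀ j, j < j0 → ¬ Hit n weak ds j) →
        solution_alt n weak dist = (j0 : Int) + 1)) := by
  intro ds
  set m := weak.length with hm
  set lv0 : PySem.Dict (List Int) Int := PySem.Dict.insert PySem.Dict.empty weak 0 with hlv0
  set bks0 : List (List (List Int)) :=
    (List.replicate (m + 1) ([] : List (List Int))).set m [weak] with hbks0
  have hEm : ∀ i S, ¬ ProdFrom n weak ds (fun _ => False) i S := by
    rintro i S ⟨-, T, p, hPT, -⟩
    exact hPT
  have hL0 : LvInv weak (ProdFrom n weak ds (fun _ => False)) lv0 := by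
    intro S v
    rw [hlv0, PySem.Dict.get?_insert]
    by_cases hS : S = weak
    · subst hS
      rw [if_pos rfl]
      constructor
      · intro h
        have : v = 0 := by injection h with h'; omega
        exact Or.inl ⟨rfl, this⟩
      · rintro (⟨-, rfl⟩ | ⟨h1, -⟩)
        · rfl
        · exact absurd rfl h1
    · rw [if_neg hS, PySem.Dict.get?_empty]
      constructor
      · intro h; cases h
      · rintro (⟨h1, -⟩ | ⟨-, -, ⟨i, hi, -⟩, -⟩)
        · exact absurd h1 hS
        · exact absurd hi (hEm i S)
  have hgetD : ∀ l : Nat, bks0.getD l [] = if l = m then [weak] else [] := by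
    intro l
    rw [hbks0]
    by_cases hl : l = m
    · subst hl
      rw [if_pos rfl, List.getD, List.getElem?_set_self (by simp)]
      rfl
    · rw [if_neg hl, List.getD]
      by_cases hlm : l < m + 1
      · rw [List.getElem?_set_ne (fun h => hl h.symm), List.getElem?_eq_getElem (by simp [hlm])]
        simp
      · rw [List.getElem?_eq_none (by simp; omega)]
        rfl
  have hB0 : BksInv lv0 bks0 m := by
    refine ⟨by rw [hbks0]; simp, ?_⟩
    intro l
    rw [hgetD l]
    by_cases hl : l = m
    · subst hl
      rw [if_pos rfl]
      refine ⟨List.nodup_singleton _, ?_⟩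
      intro S
      rw [List.mem_singleton]
      constructor
      · intro hS
        rw [hS]
        exact ⟨rfl, 0, (hL0 weak 0).mpr (Or.inl ⟨rfl, rfl⟩)⟩
      · rintro ⟨h1, v, hv⟩
        rcases (hL0 S v).mp hv with ⟨h', -⟩ | ⟨-, -, ⟨i, hi, -⟩, -⟩
        · exact h'
        · exact absurd hi (hEm i S)
    · rw [if_neg hl]
      refine ⟨List.nodup_nil, ?_⟩
      intro S
      simp only [List.not_mem_nil, false_iff]
      rintro ⟨h1, v, hv⟩
      rcases (hL0 S v).mp hv with ⟨hw, -⟩ | ⟨-, -, ⟨i, hi, -⟩, -⟩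
      · exact hl (by rw [← h1, hw])
      · exact absurd hi (hEm i S)
  have hBe0 : BestInv (ProdFrom n weak ds (fun _ => False)) none :=
    Or.inl ⟨rfl, fun i => hEm i []⟩
  have hD0 : Dcond n weak ds (fun _ => False) none m := by
    intro T iT hTlen hiT hF hBV
    have := (Fr_sublist n weak ds iT T hF).length_le
    omega
  obtain ⟨Qf, gL, gBe, gD⟩ := stageB_spec n weak ds m lv0 bks0 none (fun _ => False)
    (fun T h => h.elim) hL0 hB0 hBe0 hD0
  have hun : solution_alt n weak dist =
      match (stageB n ds (ds.length : Int) m (lv0, bks0, none)).2.2 with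
      | none => -1
      | some b => b := by
    rfl
  constructor
  · intro hno
    rw [hun]
    rcases gBe with ⟨hb, -⟩ | ⟨b, hb, ⟨i, hi, -⟩, -⟩
    · rw [hb]
    · obtain ⟨hik, T, p, -, hFrT, hp, hk'⟩ := hi
      exact absurd (show ∃ j, j < ds.length ∧ Hit n weak ds j from
        ⟨i, hik, T, p, hFrT, hp, hk'⟩) hno
  · intro j0 hj0 hHit hmin
    rw [hun]
    obtain ⟨S, p, hFrS, hpS, hkS⟩ := hHit
    -- the minimal hit is either recorded, or the best bound already equals it
    have hnBV : ¬ BVlt (stageB n ds (ds.length : Int) m (lv0, bks0, none)).2.2 ((j0 : Int) + 1) := by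
      intro hBV
      have hQS : Qf S := gD S j0 (List.length_pos_of_mem hpS) hj0 hFrS hBV
      have hev : ProdFrom n weak ds Qf j0 [] := ⟨hj0, S, p, hQS, hFrS, hpS, hkS⟩
      rcases gBe with ⟨-, hnoev⟩ | ⟨b, hb, -, hbd⟩
      · exact hnoev j0 hev
      · have h1 := hbd j0 hev
        have h2 := hBV b hb
        omega
    obtain ⟨b, hb, hble⟩ := not_BVlt _ _ hnBV
    rw [hb]
    show b = (j0 : Int) + 1
    rcases gBe with ⟨hnone, -⟩ | ⟨b', hb', ⟨i, hi, hv⟩, -⟩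
    · rw [hnone] at hb
      cases hb
    · have hbb : b = b' := by
        rw [hb] at hb'
        injection hb'
      subst hbb
      obtain ⟨hik, T, p', -, hFrT, hp', hk'⟩ := hi
      have hj0i : j0 ≤ i := by
        by_contra h
        exact hmin i (by omega) ⟨T, p', hFrT, hp', hk'⟩
      omega

theorem solution_spec : Claim_equal_solution := by
  intro n weak dist _ _
  unfold Spec_solution
  have hq : ∀ S, S ∈ [weak] ↔ Fr n weak (PySem.List.sorted dist (fun x => x) true) 0 S := by
    intro S
    rw [List.mem_singleton]
    exact Iff.rfl
  have hv : ∀ S, S ∈ PySem.Set.add PySem.Set.empty weak ↔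
      Vi n weak (PySem.List.sorted dist (fun x => x) true) 0 S := by
    intro S
    rw [PySem.Set.mem_add]
    constructor
    · rintro (h | h)
      · cases h
      · exact h
    · intro h
      exact Or.inr h
  obtain ⟨a1, a2⟩ := bfsA_run n weak (PySem.List.sorted dist (fun x => x) true)
    (PySem.List.sorted dist (fun x => x) true) 0 [weak] (PySem.Set.add PySem.Set.empty weak)
    rfl (List.nodup_singleton _) hq hv
  obtain ⟨b1, b2⟩ := solution_alt_correct n weak dist
  have hA : solution n weak dist =
      bfsA n (PySem.List.sorted dist (fun x => x) true) ((0 : Nat) : Int) [weak]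
        (PySem.Set.add PySem.Set.empty weak) := rfl
  by_cases hex : ∃ j, j < (PySem.List.sorted dist (fun x => x) true).length ∧
      Hit n weak (PySem.List.sorted dist (fun x => x) true) j
  · have hmem := Nat.sInf_mem (hex : {j | j < (PySem.List.sorted dist (fun x => x) true).length ∧
      Hit n weak (PySem.List.sorted dist (fun x => x) true) j}.Nonempty)
    obtain ⟨hj0len, hj0hit⟩ := hmem
    have hmin : ∀ j, j < sInf {j | j < (PySem.List.sorted dist (fun x => x) true).length ∧
        Hit n weak (PySem.List.sorted dist (fun x => x) true) j} →
        ¬ Hit n weak (PySem.List.sorted dist (fun x => x) true) j := by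
      intro j hj hH
      exact Nat.notMem_of_lt_sInf hj ⟨lt_trans hj hj0len, hH⟩
    rw [hA, a2 _ (Nat.zero_le _) hj0len hj0hit (fun j _ hj => hmin j hj),
      b2 _ hj0len hj0hit hmin]
  · have hno : ∀ j, (0 : Nat) ≤ j → j < (PySem.List.sorted dist (fun x => x) true).length →
        ¬ Hit n weak (PySem.List.sorted dist (fun x => x) true) j :=
      fun j _ hj hH => hex ⟨j, hj, hH⟩
    rw [hA, a1 hno, b1 hex]
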